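-- pv_equiv track=rewrite | github.com/Alex-Shen1121/SZU_Learning_Resource | 计算机与软件学院/Python程序设计/实验/实验8/code/代码/实验/3 (6).py | is_almost_symmetric
-- ===== SOURCE A (Python) =====
-- def is_almost_symmetric(list1):
--     if list1 == list1[::-1]:
--         return False, None, None
--     for i in range(len(list1)):
--         for j in range(i+1, len(list1)):
--             temp = list1[:]
--             temp[i], temp[j] = temp[j], temp[i]
--             if temp == temp[::-1]:
--                 return True, i, j
--     return False, None, None
-- ===== SOURCE B (Python) =====
-- def _pal_after_swap(l, n, mm, i, j):
--     # O(1) check (|mm| never exceeds what short-circuits): swapping i,j yields a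
--     # palindrome iff every mismatched mirror-pair is touched by the swap and the
--     # two touched pairs match afterwards.
--     ci = min(i, n - 1 - i)
--     cj = min(j, n - 1 - j)
--     for k in mm:
--         if k != ci and k != cj:
--             return False
--
--     def val(x):
--         if x == i:
--             return l[j]
--         if x == j:
--             return l[i]
--         return l[x]
--
--     return val(ci) == val(n - 1 - ci) and val(cj) == val(n - 1 - cj)
--
--
-- def is_almost_symmetric(list1):
--     n = len(list1)
--     mm = [k for k in range(n // 2) if list1[k] != list1[n - 1 - k]]
--     if not mm:
--         return False, None, None
--     for i in range(n):
--         for j in range(i + 1, n):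
--             if _pal_after_swap(list1, n, mm, i, j):
--                 return True, i, j
--     return False, None, None
-- ===== Notes on version B (the rewrite author's own statement) =====
-- stated objective: faster
-- what changed: B precomputes the list of mismatched mirror-pairs in one pass and replaces A's O(n) copy-swap-and-reverse palindrome test per candidate pair by an O(1) check (every mismatched pair must be touched by the swap and the two touched pairs must match afterwards), keeping A's search order.
import Mathlib
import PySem

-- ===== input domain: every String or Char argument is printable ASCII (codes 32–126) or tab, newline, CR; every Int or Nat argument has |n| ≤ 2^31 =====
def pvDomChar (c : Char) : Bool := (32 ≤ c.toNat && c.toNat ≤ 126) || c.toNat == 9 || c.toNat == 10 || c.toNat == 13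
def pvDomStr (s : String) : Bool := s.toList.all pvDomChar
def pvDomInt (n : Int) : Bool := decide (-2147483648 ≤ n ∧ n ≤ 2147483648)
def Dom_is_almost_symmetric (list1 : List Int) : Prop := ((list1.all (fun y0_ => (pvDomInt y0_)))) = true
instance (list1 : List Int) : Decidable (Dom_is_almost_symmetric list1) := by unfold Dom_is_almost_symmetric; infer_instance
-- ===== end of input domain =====

-- B replaces A's O(n) palindrome test per candidate swap by a one-pass list of
-- mismatched mirror-pairs plus an O(1) per-pair check, in the same search order (objective: faster).

-- ===== PORT A =====
-- temp = list1[:]; temp[i], temp[j] = temp[j], temp[i]  (i, j are in-range loop indices,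
-- so getD's default is never used and List.set is exact Python item assignment)
def pySwapA (l : List Int) (i j : Nat) : List Int :=
  (l.set i (l.getD j 0)).set j (l.getD i 0)

-- inner 'for j in range(i+1, len(list1))' with early return
def aLoopJ (l : List Int) (i : Nat) : List Nat → Option (Bool × Option Int × Option Int)
  | [] => none
  | j :: js =>
      let temp := pySwapA l i j
      if temp = temp.reverse then some (true, some (i : Int), some (j : Int))
      else aLoopJ l i js

-- outer 'for i in range(len(list1))'
def aLoopI (l : List Int) : List Nat → Bool × Option Int × Option Int
  | [] => (false, none, none)
  | i :: is' =>
      match aLoopJ l i (List.range' (i + 1) (l.length - (i + 1))) with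
      | some r => r
      | none => aLoopI l is'

def is_almost_symmetric (list1 : List Int) : Bool × Option Int × Option Int :=
  if list1 = list1.reverse then (false, none, none)
  else aLoopI list1 (List.range list1.length)

-- ===== PORT B =====
-- mm = [k for k in range(n//2) if list1[k] != list1[n-1-k]]
def mmList (l : List Int) : List Nat :=
  (List.range (l.length / 2)).filter (fun k => decide (l.getD k 0 ≠ l.getD (l.length - 1 - k) 0))

-- 'for k in mm: if k != ci and k != cj: return False'
def mmSubset (ci cj : Nat) : List Nat → Bool
  | [] => true
  | k :: ks => if k ≠ ci ∧ k ≠ cj then false else mmSubset ci cj ks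

-- the inner 'def val(x)' of _pal_after_swap, lifted to the top level
def valB (l : List Int) (i j x : Nat) : Int :=
  if x = i then l.getD j 0 else if x = j then l.getD i 0 else l.getD x 0

-- _pal_after_swap
def palAfterSwap (l : List Int) (n : Nat) (mm : List Nat) (i j : Nat) : Bool :=
  let ci := min i (n - 1 - i)
  let cj := min j (n - 1 - j)
  if mmSubset ci cj mm then
    decide (valB l i j ci = valB l i j (n - 1 - ci) ∧ valB l i j cj = valB l i j (n - 1 - cj))
  else false

def bLoopJ (l : List Int) (n : Nat) (mm : List Nat) (i : Nat) :
    List Nat → Option (Bool × Option Int × Option Int)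
  | [] => none
  | j :: js =>
      if palAfterSwap l n mm i j then some (true, some (i : Int), some (j : Int))
      else bLoopJ l n mm i js

def bLoopI (l : List Int) (n : Nat) (mm : List Nat) : List Nat → Bool × Option Int × Option Int
  | [] => (false, none, none)
  | i :: is' =>
      match bLoopJ l n mm i (List.range' (i + 1) (n - (i + 1))) with
      | some r => r
      | none => bLoopI l n mm is'

def is_almost_symmetric_alt (list1 : List Int) : Bool × Option Int × Option Int :=
  let n := list1.length
  let mm := mmList list1
  if mm = [] then (false, none, none)
  else bLoopI list1 n mm (List.range n)

-- ===== PRECONDITION & SPEC =====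
def Spec_is_almost_symmetric (list1 : List Int) (out : Bool × Option Int × Option Int) : Prop := out = is_almost_symmetric_alt list1
instance (list1 : List Int) (out : Bool × Option Int × Option Int) : Decidable (Spec_is_almost_symmetric list1 out) := by unfold Spec_is_almost_symmetric; infer_instance

-- ===== CLAIM (what is proved, stated in full; the proofs are below) =====
def Claim_equal_is_almost_symmetric : Prop := ∀ (list1 : List Int), Dom_is_almost_symmetric list1 → Spec_is_almost_symmetric list1 (is_almost_symmetric list1)

-- ===== LEMMAS AND PROOFS =====

theorem getD_rev (t : List Int) (k : Nat) (hk : k < t.length) :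
    t.reverse.getD k 0 = t.getD (t.length - 1 - k) 0 := by
  rw [List.getD_eq_getElem _ _ (by simpa using hk), List.getD_eq_getElem _ _ (by omega)]
  simp [List.getElem_reverse]

theorem pal_iff (t : List Int) :
    t = t.reverse ↔ ∀ k, k < t.length → t.getD k 0 = t.getD (t.length - 1 - k) 0 := by
  constructor
  · intro h k hk
    calc t.getD k 0 = t.reverse.getD k 0 := by conv_lhs => rw [h]
    _ = t.getD (t.length - 1 - k) 0 := getD_rev t k hk
  · intro h
    apply List.ext_getElem (by simp)
    intro k h1 h2
    rw [List.getElem_reverse]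
    have := h k h1
    rwa [List.getD_eq_getElem _ _ h1, List.getD_eq_getElem _ _ (by omega)] at this

theorem pal_iff_half (t : List Int) :
    t = t.reverse ↔ ∀ k, k < t.length / 2 → t.getD k 0 = t.getD (t.length - 1 - k) 0 := by
  rw [pal_iff]
  constructor
  · intro h k hk
    exact h k (by omega)
  · intro h k hk
    rcases Nat.lt_trichotomy k (t.length - 1 - k) with hlt | heq | hgt
    · exact h k (by omega)
    · rw [← heq]
    · have := h (t.length - 1 - k) (by omega)
      rw [show t.length - 1 - (t.length - 1 - k) = k by omega] at this
      exact this.symm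

theorem mem_mmList (l : List Int) (k : Nat) :
    k ∈ mmList l ↔ k < l.length / 2 ∧ l.getD k 0 ≠ l.getD (l.length - 1 - k) 0 := by
  simp [mmList, List.mem_filter, List.mem_range]

theorem mmList_nil_iff (l : List Int) : mmList l = [] ↔ l = l.reverse := by
  rw [pal_iff_half, List.eq_nil_iff_forall_not_mem]
  constructor
  · intro h k hk
    by_contra hne
    exact h k ((mem_mmList l k).2 ⟨hk, hne⟩)
  · intro h k hk
    obtain ⟨h1, h2⟩ := (mem_mmList l k).1 hk
    exact h2 (h k h1)

theorem swap_getD (l : List Int) (i j x : Nat) (hi : i < l.length) (hj : j < l.length)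
    (hij : i ≠ j) : (pySwapA l i j).getD x 0 = valB l i j x := by
  simp only [pySwapA, valB, List.getD_eq_getElem?_getD, List.getElem?_set, List.length_set]
  by_cases hxi : x = i <;> by_cases hxj : x = j
  · exact absurd (hxi.symm.trans hxj) hij
  · subst hxi
    simp [Ne.symm hij, hi, hj]
  · subst hxj
    simp [Ne.symm hij, hi, hj]
  · simp [hxi, hxj, Ne.symm hxi, Ne.symm hxj]

theorem mmSubset_iff (ci cj : Nat) (ks : List Nat) :
    mmSubset ci cj ks = true ↔ ∀ k ∈ ks, k = ci ∨ k = cj := by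
  induction ks with
  | nil => simp [mmSubset]
  | cons k ks ih =>
    simp only [mmSubset, List.mem_cons]
    split_ifs with h
    · simp only [false_iff]
      intro hall
      rcases hall k (Or.inl rfl) with h1 | h1 <;> exact absurd h1 (by tauto)
    · rw [ih]
      constructor
      · intro hall x hx
        rcases hx with hx | hx
        · subst hx; tauto
        · exact hall x hx
      · intro hall x hx
        exact hall x (Or.inr hx)

theorem check_iff (l : List Int) (i j : Nat) (hi : i < l.length) (hj : j < l.length)
    (hij : i < j) :
    palAfterSwap l l.length (mmList l) i j = true ↔
      pySwapA l i j = (pySwapA l i j).reverse := by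
  have hijne : i ≠ j := Nat.ne_of_lt hij
  have hlen : (pySwapA l i j).length = l.length := by simp [pySwapA]
  have hval : ∀ x, (pySwapA l i j).getD x 0 = valB l i j x :=
    fun x => swap_getD l i j x hi hj hijne
  rw [pal_iff_half, hlen]
  simp only [hval, palAfterSwap]
  constructor
  · intro hpa
    split_ifs at hpa with hsub
    · rw [decide_eq_true_iff] at hpa
      obtain ⟨hv1, hv2⟩ := hpa
      have hsub' := (mmSubset_iff _ _ (mmList l)).1 hsub
      intro k hk
      by_cases hkci : k = min i (l.length - 1 - i)
      · rw [hkci]; exact hv1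
      · by_cases hkcj : k = min j (l.length - 1 - j)
        · rw [hkcj]; exact hv2
        · have hknm : k ∉ mmList l := fun hm => by
            rcases hsub' k hm with h | h <;> tauto
          rw [mem_mmList] at hknm
          have heq : l.getD k 0 = l.getD (l.length - 1 - k) 0 := by
            by_contra hne
            exact hknm ⟨hk, hne⟩
          have hki : k ≠ i := by omega
          have hkj : k ≠ j := by omega
          have hki' : l.length - 1 - k ≠ i := by omega
          have hkj' : l.length - 1 - k ≠ j := by omega
          simp only [valB, if_neg hki, if_neg hkj, if_neg hki', if_neg hkj']
          exact heq
  · intro hp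
    have hsub : mmSubset (min i (l.length - 1 - i)) (min j (l.length - 1 - j)) (mmList l) = true := by
      rw [mmSubset_iff]
      intro k hk
      obtain ⟨hk2, hne⟩ := (mem_mmList l k).1 hk
      by_contra hboth
      obtain ⟨hkci, hkcj⟩ := not_or.1 hboth
      have hki : k ≠ i := by omega
      have hkj : k ≠ j := by omega
      have hki' : l.length - 1 - k ≠ i := by omega
      have hkj' : l.length - 1 - k ≠ j := by omega
      have := hp k hk2
      rw [valB, valB, if_neg hki, if_neg hkj, if_neg hki', if_neg hkj'] at this
      exact hne this
    rw [if_pos hsub, decide_eq_true_iff]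
    constructor
    · by_cases hc : min i (l.length - 1 - i) < l.length / 2
      · exact hp _ hc
      · rw [show l.length - 1 - min i (l.length - 1 - i) = min i (l.length - 1 - i) by omega]
    · by_cases hc : min j (l.length - 1 - j) < l.length / 2
      · exact hp _ hc
      · rw [show l.length - 1 - min j (l.length - 1 - j) = min j (l.length - 1 - j) by omega]

theorem loopJ_eq (l : List Int) (i : Nat) (hi : i < l.length) (js : List Nat) :
    (∀ j ∈ js, i < j ∧ j < l.length) →
    aLoopJ l i js = bLoopJ l l.length (mmList l) i js := by
  induction js with
  | nil => intro _; rfl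
  | cons j js ih =>
    intro hjs
    obtain ⟨h1, h2⟩ := hjs j (List.mem_cons_self ..)
    have hc := check_iff l i j hi h2 h1
    simp only [aLoopJ, bLoopJ]
    by_cases hp : pySwapA l i j = (pySwapA l i j).reverse
    · rw [if_pos hp, if_pos (hc.2 hp)]
    · rw [if_neg hp, if_neg (fun hb => hp (hc.1 hb))]
      exact ih (fun x hx => hjs x (List.mem_cons_of_mem _ hx))

theorem loopI_eq (l : List Int) (is' : List Nat) :
    (∀ i ∈ is', i < l.length) →
    aLoopI l is' = bLoopI l l.length (mmList l) is' := by
  induction is' with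
  | nil => intro _; rfl
  | cons i is' ih =>
    intro his
    have hi := his i (List.mem_cons_self ..)
    simp only [aLoopI, bLoopI]
    rw [loopJ_eq l i hi _ (by intro j hj; rw [List.mem_range'_1] at hj; omega)]
    cases bLoopJ l l.length (mmList l) i (List.range' (i + 1) (l.length - (i + 1))) with
    | none => exact ih (fun x hx => his x (List.mem_cons_of_mem _ hx))
    | some r => rfl

-- ===== VERDICT (by name: the statement is the Claim_ definition above) =====
theorem is_almost_symmetric_spec : Claim_equal_is_almost_symmetric := by
  intro l _
  show is_almost_symmetric l = is_almost_symmetric_alt l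
  simp only [is_almost_symmetric, is_almost_symmetric_alt]
  by_cases h : l = l.reverse
  · rw [if_pos h, if_pos ((mmList_nil_iff l).2 h)]
  · rw [if_neg h, if_neg (fun hn => h ((mmList_nil_iff l).1 hn))]
    exact loopI_eq l (List.range l.length) (fun i hi => List.mem_range.1 hi)
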